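-- pv_equiv track=rewrite | github.com/jadc83/Programacion-Funcional | ej11.py | quitar
-- ===== SOURCE A (Python) =====
-- def quitar(elemento, tupla, tupla1):
--     if len(tupla) == 0:
--         return "".join(tupla1)
--     else:
--         if elemento == tupla[0]:
--             return quitar(elemento, tupla[1:], tupla1)
--         else:
--             return quitar(elemento, tupla[1:], tupla1 + (tupla[0],))
-- ===== SOURCE B (Python) =====
-- def quitar(elemento, tupla, tupla1):
--     resultado = list(tupla1)
--     for x in tupla:
--         if x != elemento:
--             resultado.append(x)
--     return "".join(resultado)
-- ===== Notes on version B (the rewrite author's own statement) =====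
-- stated objective: faster
-- what changed: Replaced the tail-recursive accumulator-passing recursion (which rebuilds a slice and a concatenated tuple at every step) with an explicit iterative for-loop appending to a list, joined once at the end.
import Mathlib
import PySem

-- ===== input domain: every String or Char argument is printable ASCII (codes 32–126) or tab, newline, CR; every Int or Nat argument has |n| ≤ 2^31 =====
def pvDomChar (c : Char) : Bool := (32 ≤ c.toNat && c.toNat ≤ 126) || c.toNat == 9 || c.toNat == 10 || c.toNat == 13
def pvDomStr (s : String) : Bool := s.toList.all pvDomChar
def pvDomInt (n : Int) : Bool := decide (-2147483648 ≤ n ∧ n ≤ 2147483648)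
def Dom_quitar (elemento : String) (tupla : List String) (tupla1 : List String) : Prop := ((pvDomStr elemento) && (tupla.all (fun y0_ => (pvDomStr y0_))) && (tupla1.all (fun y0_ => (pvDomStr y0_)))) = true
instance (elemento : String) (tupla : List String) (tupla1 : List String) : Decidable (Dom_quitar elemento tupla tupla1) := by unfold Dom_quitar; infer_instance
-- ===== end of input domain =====

-- ===== PORT A =====
-- B rewrites A's tail recursion as an explicit iterative loop over a growing accumulator; same return values.
def quitar (elemento : String) (tupla : List String) (tupla1 : List String) : String :=
  match tupla with
  | [] => PySem.Str.join "" tupla1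
  | t0 :: rest =>
    if elemento = t0 then quitar elemento rest tupla1
    else quitar elemento rest (tupla1 ++ [t0])

-- ===== PORT B =====
def quitar_alt (elemento : String) (tupla : List String) (tupla1 : List String) : String :=
  PySem.Str.join "" (tupla.foldl (fun resultado x => if x ≠ elemento then resultado ++ [x] else resultado) tupla1)

-- ===== PRECONDITION & SPEC =====
def Spec_quitar (elemento : String) (tupla : List String) (tupla1 : List String) (out : String) : Prop := out = quitar_alt elemento tupla tupla1
instance (elemento : String) (tupla : List String) (tupla1 : List String) (out : String) : Decidable (Spec_quitar elemento tupla tupla1 out) := by unfold Spec_quitar; infer_instance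

-- ===== CLAIM (what is proved, stated in full; the proofs are below) =====
def Claim_equal_quitar : Prop := ∀ (elemento : String) (tupla : List String) (tupla1 : List String), Dom_quitar elemento tupla tupla1 → Spec_quitar elemento tupla tupla1 (quitar elemento tupla tupla1)

-- ===== LEMMAS AND PROOFS =====

-- ===== VERDICT (by name: the statement is the Claim_ definition above) =====
theorem quitar_key (elemento : String) (tupla : List String) :
    ∀ tupla1, quitar elemento tupla tupla1 = quitar_alt elemento tupla tupla1 := by
  induction tupla with
  | nil => intro t1; rfl
  | cons t0 rest ih =>
    intro t1
    by_cases h : elemento = t0 <;>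
      simp [quitar, quitar_alt, List.foldl, h, Ne, eq_comm] at ih ⊢ <;>
      exact ih _

theorem quitar_spec : Claim_equal_quitar := by
  intro elemento tupla tupla1 _
  exact quitar_key elemento tupla tupla1
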